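-- pv_equiv track=rewrite | github.com/AnderssonProgramming/AYED-resources | BIBLE/tareas/tDinamica/clavos.py | clavos
-- ===== SOURCE A (Python) =====
-- def clavos(secu, pos, vel):
--     if vel == 0 and secu[pos] == "T":
--         return True
--     elif vel == 0 and secu[pos] == "F":
--         return False
--     else:
--         for i in range(-1, 1):
--             if secu[pos + i] == "T":
--                 return clavos(secu, pos + i, vel + i)
--             else:
--                 return False
-- ===== SOURCE B (Python) =====
-- def clavos(secu, pos, vel):
--     # Closed-form case analysis instead of simulating the recursive walk.
--     if vel < 0:
--         # vel never returns to 0, so the walk can only end in False.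
--         return False
--     if vel == 0:
--         # 'T' -> True; anything else ('F' or other) ends in False.
--         return secu[pos] == "T"
--     # vel > 0: True iff every nail stepped on, secu[pos-1] .. secu[pos-vel], is "T"
--     # (the last one doubles as the vel == 0 check on arrival).
--     return all(secu[j] == "T" for j in range(pos - 1, pos - vel - 1, -1))
-- ===== Notes on version B (the rewrite author's own statement) =====
-- stated objective: alternative
-- what changed: Instead of simulating the recursive backward walk, B decides the result by a closed-form case analysis on vel: vel<0 can only end False, vel==0 is decided by secu[pos] directly, and vel>0 holds iff all of secu[pos-1..pos-vel] are 'T' (one short-circuiting all() over a countdown range).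
import Mathlib
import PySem

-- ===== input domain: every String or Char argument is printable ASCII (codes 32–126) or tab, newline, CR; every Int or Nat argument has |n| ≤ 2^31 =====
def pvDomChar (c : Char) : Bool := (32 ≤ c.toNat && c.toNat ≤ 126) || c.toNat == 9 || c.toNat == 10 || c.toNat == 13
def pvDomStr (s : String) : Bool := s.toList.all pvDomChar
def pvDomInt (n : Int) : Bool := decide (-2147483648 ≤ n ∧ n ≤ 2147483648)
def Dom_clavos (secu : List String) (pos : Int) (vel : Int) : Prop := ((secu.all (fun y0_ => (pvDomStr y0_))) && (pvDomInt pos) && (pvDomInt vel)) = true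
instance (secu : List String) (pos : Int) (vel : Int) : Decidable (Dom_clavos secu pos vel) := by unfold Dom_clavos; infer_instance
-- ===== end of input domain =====

-- B replaces A's recursive backward walk by a closed-form case analysis on vel
-- (vel<0 → False, vel=0 → secu[pos]=="T", vel>0 → all of secu[pos-1..pos-vel] are "T");
-- equivalence is about the return value on Pre_ (inputs where A returns normally).

-- ===== PORT A =====
-- A's 'for i in range(-1, 1)' always returns on its first iteration (i = -1).
def clavos (secu : List String) (pos : Int) (vel : Int) : Bool :=
  if vel = 0 ∧ PySem.List.pyGet? secu pos = some "T" then true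
  else if vel = 0 ∧ PySem.List.pyGet? secu pos = some "F" then false
  else
    match h : PySem.List.pyGet? secu (pos - 1) with
    | some s => if s = "T" then clavos secu (pos - 1) (vel - 1) else false
    | none => false   -- Python raises IndexError here; Pre_clavos excludes these inputs
termination_by (pos + secu.length).toNat
decreasing_by
  have hr : ¬ PySem.List.pyGet? secu (pos - 1) = none := by simp [h]
  rw [PySem.List.pyGet?_eq_none_iff] at hr
  have := not_not.mp hr
  unfold PySem.Raise.InRange at this
  omega

-- ===== PORT B =====
-- exact hand-port of Source B's short-circuiting `all(secu[j] == "T" for j in range(j0, stop, -1))`: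
-- consume the countdown range lazily, stopping at the first j whose element is not "T"
-- (an out-of-range j, a Python IndexError, evaluates to false here; Pre_ excludes it).
def pvAllTFrom (secu : List String) (j stop : Int) : Bool :=
  if stop < j then
    match PySem.List.pyGet? secu j with
    | some "T" => pvAllTFrom secu (j - 1) stop
    | _ => false
  else true
termination_by (j - stop).toNat
decreasing_by omega

-- literal port of Source B: two guard cases, then all() over range(pos-1, pos-vel-1, -1).
def clavos_alt (secu : List String) (pos : Int) (vel : Int) : Bool :=
  if vel < 0 then false
  else if vel = 0 then PySem.List.pyGet? secu pos == some "T"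
  else pvAllTFrom secu (pos - 1) (pos - vel - 1)

-- ===== PRECONDITION & SPEC =====
-- Pre_clavos is exactly the set of inputs on which the Python A returns normally
-- (elsewhere A raises IndexError on an out-of-range access during the backward walk).
-- 'elements at indices -len .. p-1 (Python negative indexing) are all "T"'
def pvAllT (secu : List String) (p : Int) : Prop :=
  ∀ s ∈ secu.take (if 1 ≤ p then secu.length else (p + secu.length).toNat), s = "T"
-- the pure backward descent starting at position p terminates with a return (no raise)
def pvDescentReturns (secu : List String) (p : Int) : Prop :=
  -(secu.length : Int) ≤ p - 1 ∧ p - 1 < secu.length ∧ ¬ pvAllT secu p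
def Pre_clavos (secu : List String) (pos : Int) (vel : Int) : Prop :=
  if vel = 0 then
    -(secu.length : Int) ≤ pos ∧ pos < secu.length ∧
      (PySem.List.pyGet? secu pos = some "T" ∨ PySem.List.pyGet? secu pos = some "F" ∨
        pvDescentReturns secu pos)
  else if 0 < vel then
    -(secu.length : Int) ≤ pos - 1 ∧ pos - 1 < secu.length ∧
      (-(secu.length : Int) ≤ pos - vel ∨ ¬ pvAllT secu pos)
  else pvDescentReturns secu pos
instance (secu : List String) (pos : Int) (vel : Int) : Decidable (Pre_clavos secu pos vel) := by
  unfold Pre_clavos; unfold pvDescentReturns pvAllT; infer_instance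
def pvWitness_clavos : List String × Int × Int := (["T", "T", "F"], 2, 2)
def Spec_clavos (secu : List String) (pos : Int) (vel : Int) (out : Bool) : Prop := out = clavos_alt secu pos vel
instance (secu : List String) (pos : Int) (vel : Int) (out : Bool) : Decidable (Spec_clavos secu pos vel out) := by unfold Spec_clavos; infer_instance

-- ===== CLAIM (what is proved, stated in full; the proofs are below) =====
def Claim_equal_clavos : Prop := ∀ (secu : List String) (pos : Int) (vel : Int), Dom_clavos secu pos vel → Pre_clavos secu pos vel → Spec_clavos secu pos vel (clavos secu pos vel)

-- ===== LEMMAS AND PROOFS =====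
-- the ports agree everywhere (both map an out-of-range access to false)
theorem clavos_eq_alt (secu : List String) (pos vel : Int) :
    clavos secu pos vel = clavos_alt secu pos vel := by
  fun_induction clavos secu pos vel with
  | case1 pos vel hc =>
    obtain ⟨h0, hT⟩ := hc
    simp [clavos_alt, h0, hT]
  | case2 pos vel h1 hc =>
    obtain ⟨h0, hF⟩ := hc
    have hT : PySem.List.pyGet? secu pos ≠ some "T" := by simp [hF]
    simp [clavos_alt, h0, hT]
  | case3 pos vel h1 h2 hs ih =>
    rw [ih]
    rcases lt_trichotomy vel 0 with hv | hv | hv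
    · simp [clavos_alt, hv, show vel - 1 < 0 by omega]
    · subst hv
      have hT : PySem.List.pyGet? secu pos ≠ some "T" := fun hc => h1 ⟨rfl, hc⟩
      simp [clavos_alt, hT]
    · have hstep : pvAllTFrom secu (pos - 1) (pos - vel - 1)
          = pvAllTFrom secu (pos - 1 - 1) (pos - vel - 1) := by
        rw [pvAllTFrom]; simp [show pos - vel - 1 < pos - 1 by omega, hs]
      by_cases hv1 : vel = 1
      · subst hv1
        have hnil : pvAllTFrom secu (pos - 1 - 1) (pos - 1 - 1) = true := by
          rw [pvAllTFrom]; simp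
        simp [clavos_alt, hstep, hnil, hs]
      · simp [clavos_alt, show ¬ vel < 0 by omega, show ¬ vel = 0 by omega,
              show ¬ vel - 1 < 0 by omega, show ¬ vel - 1 = 0 by omega, hstep]
  | case4 pos vel h1 h2 s hs hT =>
    rcases lt_trichotomy vel 0 with hv | hv | hv
    · simp [clavos_alt, hv]
    · subst hv
      have hT' : PySem.List.pyGet? secu pos ≠ some "T" := fun hc => h1 ⟨rfl, hc⟩
      simp [clavos_alt, hT']
    · have hstop : pvAllTFrom secu (pos - 1) (pos - vel - 1) = false := by
        rw [pvAllTFrom]; simp [show pos - vel - 1 < pos - 1 by omega, hs, hT]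
      simp [clavos_alt, show ¬ vel < 0 by omega, show ¬ vel = 0 by omega, hstop]
  | case5 pos vel h1 h2 hnone =>
    rcases lt_trichotomy vel 0 with hv | hv | hv
    · simp [clavos_alt, hv]
    · subst hv
      have hT' : PySem.List.pyGet? secu pos ≠ some "T" := fun hc => h1 ⟨rfl, hc⟩
      simp [clavos_alt, hT']
    · have hstop : pvAllTFrom secu (pos - 1) (pos - vel - 1) = false := by
        rw [pvAllTFrom]; simp [show pos - vel - 1 < pos - 1 by omega, hnone]
      simp [clavos_alt, show ¬ vel < 0 by omega, show ¬ vel = 0 by omega, hstop]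

-- ===== VERDICT (by name: the statement is the Claim_ definition above) =====
theorem clavos_spec : Claim_equal_clavos := by
  intro secu pos vel _ _
  unfold Spec_clavos
  exact clavos_eq_alt secu pos vel
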